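-- pv_equiv track=rewrite | github.com/trimcao/network-flow-attack | network_attack.py | wire_direction
-- ===== SOURCE A (Python) =====
-- def wire_direction(end_point, ends_dict, die_area):
--     """
--     Interpret the direction of a wire using end points and end points dictionary.
--     Output a pair of points (x1, y1) and (x2, y2). The possible connection must
--     belong to the rectangle composed of these two points.
--     :param end_point:
--     :param ends_dict:
--     :return: a pair of corner points
--     """
--     # boundary from die area
--     min_x = die_area[0][0]
--     min_y = die_area[0][1]
--     max_x = die_area[1][0]
--     max_y = die_area[1][1]
--     # iterate through each next point
--     next_pts = ends_dict[end_point]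
--     corner1 = [min_x, min_y] # initialize the corner points
--     corner2 = [max_x, max_y]
--     for each_pt in next_pts:
--         diff_x = each_pt[0] - end_point[0]
--         diff_y = each_pt[1] - end_point[1]
--         if diff_x < 0:
--             x1 = end_point[0]
--             x2 = max_x
--         elif diff_x == 0:
--             # make no difference to the possible direction
--             x1 = min_x
--             x2 = max_x
--         else:
--             x1 = min_x
--             x2 = end_point[0]
--         # update corner of x-coordinate
--         if x1 > corner1[0]:
--             corner1[0] = x1
--         if x2 < corner2[0]:
--             corner2[0] = x2
--         # check y-coordinate
--         if diff_y < 0: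
--             y1 = end_point[1]
--             y2 = max_y
--         elif diff_y == 0:
--             y1 = min_y
--             y2 = max_y
--         else:
--             y1 = min_y
--             y2 = end_point[1]
--         # update corner of y-coordinate
--         if y1 > corner1[1]:
--             corner1[1] = y1
--         if y2 < corner2[1]:
--             corner2[1] = y2
--     corners = [corner1, corner2]
--     return corners
-- ===== SOURCE B (Python) =====
-- def wire_direction(end_point, ends_dict, die_area):
--     min_x, min_y = die_area[0][0], die_area[0][1]
--     max_x, max_y = die_area[1][0], die_area[1][1]
--     ex, ey = end_point[0], end_point[1]
--     next_pts = ends_dict[end_point]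
--     has_left = any(pt[0] < ex for pt in next_pts)
--     has_right = any(pt[0] > ex for pt in next_pts)
--     has_down = any(pt[1] < ey for pt in next_pts)
--     has_up = any(pt[1] > ey for pt in next_pts)
--     corner1 = [max(min_x, ex) if has_left else min_x,
--                max(min_y, ey) if has_down else min_y]
--     corner2 = [min(max_x, ex) if has_right else max_x,
--                min(max_y, ey) if has_up else max_y]
--     return [corner1, corner2]
-- ===== Notes on version B (the rewrite author's own statement) =====
-- stated objective: simpler
-- what changed: Replaces the per-point incremental corner updates with four existence checks over the neighbor points and a closed-form assembly of the two corners via max/min.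
import Mathlib
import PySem

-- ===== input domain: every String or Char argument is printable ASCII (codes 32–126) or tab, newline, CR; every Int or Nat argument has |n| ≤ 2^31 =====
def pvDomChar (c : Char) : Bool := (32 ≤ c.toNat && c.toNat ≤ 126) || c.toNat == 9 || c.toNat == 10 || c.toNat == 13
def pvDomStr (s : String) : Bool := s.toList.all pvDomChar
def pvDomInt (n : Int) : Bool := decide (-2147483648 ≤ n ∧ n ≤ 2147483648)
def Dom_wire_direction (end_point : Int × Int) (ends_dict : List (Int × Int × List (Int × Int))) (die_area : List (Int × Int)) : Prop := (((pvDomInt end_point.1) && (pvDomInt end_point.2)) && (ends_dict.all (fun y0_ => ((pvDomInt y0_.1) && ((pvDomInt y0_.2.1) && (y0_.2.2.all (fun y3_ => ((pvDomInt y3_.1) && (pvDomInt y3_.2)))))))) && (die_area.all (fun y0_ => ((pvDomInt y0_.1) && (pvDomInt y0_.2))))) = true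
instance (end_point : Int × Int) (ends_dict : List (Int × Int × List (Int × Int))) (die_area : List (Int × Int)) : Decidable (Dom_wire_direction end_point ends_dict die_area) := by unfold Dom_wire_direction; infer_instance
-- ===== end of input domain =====

-- B replaces A's per-point incremental corner updates with four existence checks
-- over the neighbor points and a closed-form max/min assembly of the two corners (simpler).


-- ===== PORT A =====
-- dict lookup ends_dict[end_point] (first matching key), none = KeyError
def pvLookupA (end_point : Int × Int) : List (Int × Int × List (Int × Int)) → Option (List (Int × Int))
  | [] => none
  | (x, y, pts) :: rest => if x = end_point.1 ∧ y = end_point.2 then some pts else pvLookupA end_point rest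

-- literal transliteration of A's loop: the state is (corner1x, corner1y, corner2x, corner2y)
def pvStepA (end_point : Int × Int) (min_x min_y max_x max_y : Int)
    (c : Int × Int × Int × Int) (each_pt : Int × Int) : Int × Int × Int × Int :=
  let diff_x := each_pt.1 - end_point.1
  let diff_y := each_pt.2 - end_point.2
  let xs : Int × Int :=
    if diff_x < 0 then (end_point.1, max_x)
    else if diff_x = 0 then (min_x, max_x)
    else (min_x, end_point.1)
  let c1x := if xs.1 > c.1 then xs.1 else c.1
  let c2x := if xs.2 < c.2.2.1 then xs.2 else c.2.2.1
  let ys : Int × Int :=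
    if diff_y < 0 then (end_point.2, max_y)
    else if diff_y = 0 then (min_y, max_y)
    else (min_y, end_point.2)
  let c1y := if ys.1 > c.2.1 then ys.1 else c.2.1
  let c2y := if ys.2 < c.2.2.2 then ys.2 else c.2.2.2
  (c1x, c1y, c2x, c2y)

def wire_direction (end_point : Int × Int) (ends_dict : List (Int × Int × List (Int × Int))) (die_area : List (Int × Int)) : List (List Int) :=
  match PySem.List.pyGet? die_area 0, PySem.List.pyGet? die_area 1, pvLookupA end_point ends_dict with
  | some (min_x, min_y), some (max_x, max_y), some next_pts =>
    let st := next_pts.foldl (pvStepA end_point min_x min_y max_x max_y) (min_x, min_y, max_x, max_y)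
    [[st.1, st.2.1], [st.2.2.1, st.2.2.2]]
  | _, _, _ => []  -- IndexError / KeyError in Python; excluded by Pre_

-- ===== PORT B =====
-- B's own dict lookup, none = KeyError
def pvLookupB (end_point : Int × Int) : List (Int × Int × List (Int × Int)) → Option (List (Int × Int))
  | [] => none
  | (x, y, pts) :: rest => if x = end_point.1 ∧ y = end_point.2 then some pts else pvLookupB end_point rest

def wire_direction_alt (end_point : Int × Int) (ends_dict : List (Int × Int × List (Int × Int))) (die_area : List (Int × Int)) : List (List Int) :=
  match pvLookupB end_point ends_dict with
  | none => []  -- KeyError in Python; excluded by Pre_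
  | some next_pts =>
    match PySem.List.pyGet? die_area 0 with
    | none => []  -- IndexError in Python; excluded by Pre_
    | some c0 =>
      match PySem.List.pyGet? die_area 1 with
      | none => []  -- IndexError in Python; excluded by Pre_
      | some c1 =>
        let has_left  := next_pts.any (fun pt => pt.1 < end_point.1)
        let has_right := next_pts.any (fun pt => pt.1 > end_point.1)
        let has_down  := next_pts.any (fun pt => pt.2 < end_point.2)
        let has_up    := next_pts.any (fun pt => pt.2 > end_point.2)
        [[if has_left then max c0.1 end_point.1 else c0.1,
          if has_down then max c0.2 end_point.2 else c0.2],
         [if has_right then min c1.1 end_point.1 else c1.1,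
          if has_up then min c1.2 end_point.2 else c1.2]]

-- ===== PRECONDITION & SPEC =====
-- Pre_ excludes exactly the inputs where Python A raises: die_area shorter than 2 (IndexError)
-- or end_point absent from ends_dict (KeyError).
def Pre_wire_direction (end_point : Int × Int) (ends_dict : List (Int × Int × List (Int × Int))) (die_area : List (Int × Int)) : Prop :=
  2 ≤ die_area.length ∧ ∃ e ∈ ends_dict, e.1 = end_point.1 ∧ e.2.1 = end_point.2
instance (end_point : Int × Int) (ends_dict : List (Int × Int × List (Int × Int))) (die_area : List (Int × Int)) : Decidable (Pre_wire_direction end_point ends_dict die_area) := by unfold Pre_wire_direction; infer_instance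

def pvWitness_wire_direction : (Int × Int) × (List (Int × Int × List (Int × Int))) × (List (Int × Int)) :=
  ((1, 2), [(1, 2, [(0, 5)])], [(0, 0), (10, 10)])

def Spec_wire_direction (end_point : Int × Int) (ends_dict : List (Int × Int × List (Int × Int))) (die_area : List (Int × Int)) (out : List (List Int)) : Prop := out = wire_direction_alt end_point ends_dict die_area
instance (end_point : Int × Int) (ends_dict : List (Int × Int × List (Int × Int))) (die_area : List (Int × Int)) (out : List (List Int)) : Decidable (Spec_wire_direction end_point ends_dict die_area out) := by unfold Spec_wire_direction; infer_instance

-- ===== CLAIM (what is proved, stated in full; the proofs are below) =====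
def Claim_equal_wire_direction : Prop := ∀ (end_point : Int × Int) (ends_dict : List (Int × Int × List (Int × Int))) (die_area : List (Int × Int)), Dom_wire_direction end_point ends_dict die_area → Pre_wire_direction end_point ends_dict die_area → Spec_wire_direction end_point ends_dict die_area (wire_direction end_point ends_dict die_area)

-- ===== LEMMAS AND PROOFS =====

-- closed form for one accumulator component, parametrized by whether the flag has fired
def pvLo (base v : Int) (b : Bool) : Int := if b then max base v else base
def pvHi (base v : Int) (b : Bool) : Int := if b then min base v else base

lemma pvResolve (e m1 m2 q : Int) :
    (if q - e < 0 then (e, m2) else if q - e = 0 then (m1, m2) else (m1, e)) =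
      (if q < e then e else m1, if e < q then e else m2) := by
  split_ifs <;> simp_all <;> omega

lemma pvLoT (base v : Int) (b : Bool) :
    (if pvLo base v b < v then v else pvLo base v b) = pvLo base v true := by
  cases b <;> simp [pvLo, max_def] <;> split_ifs <;> omega

lemma pvLoF (base v : Int) (b : Bool) :
    (if pvLo base v b < base then base else pvLo base v b) = pvLo base v b := by
  cases b <;> simp [pvLo, max_def] <;> split_ifs <;> omega

lemma pvHiT (base v : Int) (b : Bool) :
    (if v < pvHi base v b then v else pvHi base v b) = pvHi base v true := by
  cases b <;> simp [pvHi, min_def] <;> split_ifs <;> omega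

lemma pvHiF (base v : Int) (b : Bool) :
    (if base < pvHi base v b then base else pvHi base v b) = pvHi base v b := by
  cases b <;> simp [pvHi, min_def] <;> split_ifs <;> omega

lemma pvStepA_closed (ep : Int × Int) (mnx mny mxx mxy : Int) (p : Int × Int)
    (bL bD bR bU : Bool) :
    pvStepA ep mnx mny mxx mxy
      (pvLo mnx ep.1 bL, pvLo mny ep.2 bD, pvHi mxx ep.1 bR, pvHi mxy ep.2 bU) p =
      (pvLo mnx ep.1 (bL || decide (p.1 < ep.1)), pvLo mny ep.2 (bD || decide (p.2 < ep.2)),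
       pvHi mxx ep.1 (bR || decide (p.1 > ep.1)), pvHi mxy ep.2 (bU || decide (p.2 > ep.2))) := by
  obtain ⟨px, py⟩ := p
  simp only [pvStepA]
  rw [pvResolve ep.1 mnx mxx px, pvResolve ep.2 mny mxy py]
  by_cases hL : px < ep.1 <;> by_cases hR : ep.1 < px <;>
    by_cases hD : py < ep.2 <;> by_cases hU : ep.2 < py <;>
    simp [hL, hR, hD, hU, pvLoT, pvLoF, pvHiT, pvHiF]

lemma pvFoldA_closed (ep : Int × Int) (mnx mny mxx mxy : Int) :
    ∀ (pts : List (Int × Int)) (bL bD bR bU : Bool),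
    pts.foldl (pvStepA ep mnx mny mxx mxy)
      (pvLo mnx ep.1 bL, pvLo mny ep.2 bD, pvHi mxx ep.1 bR, pvHi mxy ep.2 bU) =
      (pvLo mnx ep.1 (bL || pts.any (fun pt => pt.1 < ep.1)),
       pvLo mny ep.2 (bD || pts.any (fun pt => pt.2 < ep.2)),
       pvHi mxx ep.1 (bR || pts.any (fun pt => pt.1 > ep.1)),
       pvHi mxy ep.2 (bU || pts.any (fun pt => pt.2 > ep.2)))
  | [], bL, bD, bR, bU => by simp
  | p :: pts, bL, bD, bR, bU => by
    rw [List.foldl_cons, pvStepA_closed, pvFoldA_closed ep mnx mny mxx mxy pts]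
    simp [Bool.or_assoc]

lemma pvLookup_eq (ep : Int × Int) : ∀ d, pvLookupB ep d = pvLookupA ep d
  | [] => rfl
  | (x, y, pts) :: rest => by
    simp only [pvLookupA, pvLookupB, pvLookup_eq ep rest]

theorem wire_direction_spec : Claim_equal_wire_direction := by
  intro ep ends_dict die_area _ _
  unfold Spec_wire_direction wire_direction wire_direction_alt
  simp only [pvLookup_eq]
  cases hl : pvLookupA ep ends_dict with
  | none =>
    cases PySem.List.pyGet? die_area 0 with
    | none => rfl
    | some c0 =>
      cases PySem.List.pyGet? die_area 1 with
      | none => obtain ⟨mnx, mny⟩ := c0; rfl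
      | some c1 => obtain ⟨mnx, mny⟩ := c0; obtain ⟨mxx, mxy⟩ := c1; rfl
  | some pts =>
    cases h0 : PySem.List.pyGet? die_area 0 with
    | none => rfl
    | some c0 =>
      cases h1 : PySem.List.pyGet? die_area 1 with
      | none => rfl
      | some c1 =>
        obtain ⟨mnx, mny⟩ := c0
        obtain ⟨mxx, mxy⟩ := c1
        have h := pvFoldA_closed ep mnx mny mxx mxy pts false false false false
        simp only [pvLo, pvHi, Bool.false_or, if_neg Bool.false_ne_true] at h
        simp only [h]
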